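-- pv_equiv track=rewrite | github.com/CompRD/BroadCRD | src/paths/long/distributed/harvest_vcfs.py | divider_from_blocks
-- ===== SOURCE A (Python) =====
-- def divider_from_blocks( blocks, divider_in):
--     divider=divider_in
--     blocks.sort()
--     merged_blocks=[ [blocks[0][0],blocks[0][1]] ];
--     for b in blocks:
--         if b[0] > merged_blocks[-1][1]+1 :
--             merged_blocks.append( [ b[0] , b[1] ])
--         elif b[1] > merged_blocks[-1][1]:
--             merged_blocks[-1][1] = b[1]
--     offending_block = -1
--     for mb_idx in range( len(merged_blocks) ):
--         if ( merged_blocks[mb_idx][0] <= divider and divider <= merged_blocks[mb_idx][1] ):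
--             offending_block = mb_idx
--     if( offending_block >= 0):
--         if ( divider-merged_blocks[offending_block][0] < merged_blocks[offending_block][1]-divider ):
--             divider = merged_blocks[offending_block][0] - 1
--         else:
--             divider = merged_blocks[offending_block][1] + 1
--     return divider
-- ===== SOURCE B (Python) =====
-- def divider_from_blocks(blocks, divider_in):
--     # Different algorithm: no interval merging at all. After sorting (same in-place
--     # mutation as A), test whether the divider lies inside any block; if so, grow the
--     # covered reach rightward in one forward sweep and leftward in one backward sweep,
--     # starting from the divider itself, and move to the nearer of the two edges.
--     blocks.sort()
--     d = divider_in
--     if not any(b[0] <= d <= b[1] for b in blocks):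
--         return d
--     hi = d
--     for b in blocks:
--         if b[0] <= hi + 1 and b[1] > hi:
--             hi = b[1]
--     lo = d
--     for b in reversed(blocks):
--         if b[1] >= lo - 1 and b[0] < lo:
--             lo = b[0]
--     return lo - 1 if d - lo < hi - d else hi + 1
-- ===== Notes on version B (the rewrite author's own statement) =====
-- stated objective: alternative
-- what changed: A builds the full merged-interval list and rescans it by index for the block containing the divider; B never merges intervals at all: it checks whether any single block contains the divider and, if so, grows the covered reach from the divider itself with one rightward sweep and one leftward (reversed) sweep over the sorted blocks, then moves to the nearer edge.
import Mathlib
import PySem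

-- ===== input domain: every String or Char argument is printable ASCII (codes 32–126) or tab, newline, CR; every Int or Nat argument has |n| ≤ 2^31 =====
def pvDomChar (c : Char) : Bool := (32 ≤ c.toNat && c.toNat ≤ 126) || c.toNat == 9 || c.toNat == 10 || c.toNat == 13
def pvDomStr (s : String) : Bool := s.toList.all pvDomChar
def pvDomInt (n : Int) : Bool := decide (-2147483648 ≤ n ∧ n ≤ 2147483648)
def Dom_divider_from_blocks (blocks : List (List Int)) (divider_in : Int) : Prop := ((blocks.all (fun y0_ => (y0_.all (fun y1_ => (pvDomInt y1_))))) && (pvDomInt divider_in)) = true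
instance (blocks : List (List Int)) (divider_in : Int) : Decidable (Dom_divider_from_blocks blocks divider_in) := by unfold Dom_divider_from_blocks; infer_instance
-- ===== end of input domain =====

-- B replaces A's build-merged-list-then-rescan by a mergeless algorithm: a containment test plus
-- two scalar reach sweeps growing outward from the divider (alternative; return value only —
-- both Pythons sort `blocks` in place).


-- ===== PORT A =====
-- b[0] and b[1] (shared accessors; Pre_ excludes the IndexError inputs, so the default 0 is never read)
def pB0 (b : List Int) : Int := PySem.List.pyGetD b 0 0
def pB1 (b : List Int) : Int := PySem.List.pyGetD b 1 0

-- merging step of A's first loop (the [lo,hi] entries as pairs; only the last entry ever changes)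
def aStep (m : List (Int × Int)) (b : List Int) : List (Int × Int) :=
  if pB0 b > (m.getLastD (0, 0)).2 + 1 then
    m ++ [(pB0 b, pB1 b)]
  else if pB1 b > (m.getLastD (0, 0)).2 then
    m.dropLast ++ [((m.getLastD (0, 0)).1, pB1 b)]
  else m

def divider_from_blocks (blocks : List (List Int)) (divider_in : Int) : Int :=
  let bs := PySem.List.sorted blocks (fun x => x) false
  let merged := bs.foldl aStep [(pB0 (bs.headD []), pB1 (bs.headD []))]
  let ob := (PySem.List.pyRange 0 merged.length).foldl
      (fun acc i =>
        let mb := PySem.List.pyGetD merged i (0, 0)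
        if mb.1 ≤ divider_in ∧ divider_in ≤ mb.2 then i else acc) (-1)
  if 0 ≤ ob then
    let mb := PySem.List.pyGetD merged ob (0, 0)
    if divider_in - mb.1 < mb.2 - divider_in then mb.1 - 1 else mb.2 + 1
  else divider_in

-- ===== PORT B =====
-- B's rightward reach step: a block adjacent to or overlapping the covered reach extends it
def fwdStep (hi : Int) (b : List Int) : Int :=
  if pB0 b ≤ hi + 1 ∧ pB1 b > hi then pB1 b else hi

-- B's leftward reach step (blocks visited in reversed sorted order)
def bwdStep (lo : Int) (b : List Int) : Int :=
  if pB1 b ≥ lo - 1 ∧ pB0 b < lo then pB0 b else lo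

def divider_from_blocks_alt (blocks : List (List Int)) (divider_in : Int) : Int :=
  let bs := PySem.List.sorted blocks (fun x => x) false
  if ¬ ((bs.any fun b => decide (pB0 b ≤ divider_in ∧ divider_in ≤ pB1 b)) = true) then divider_in
  else
    let hi := bs.foldl fwdStep divider_in
    let lo := bs.reverse.foldl bwdStep divider_in
    if divider_in - lo < hi - divider_in then lo - 1 else hi + 1

-- ===== PRECONDITION & SPEC =====
-- Pre_ excludes exactly the inputs where the Python A raises IndexError: an empty blocks list
-- (blocks[0] fails) or a block with fewer than two entries (b[0]/b[1] fails).
def Pre_divider_from_blocks (blocks : List (List Int)) (divider_in : Int) : Prop :=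
  blocks ≠ [] ∧ ∀ b ∈ blocks, 2 ≤ b.length
instance (blocks : List (List Int)) (divider_in : Int) : Decidable (Pre_divider_from_blocks blocks divider_in) := by unfold Pre_divider_from_blocks; infer_instance
def pvWitness_divider_from_blocks : List (List Int) × Int := ([[0, 1], [3, 4]], 2)

def Spec_divider_from_blocks (blocks : List (List Int)) (divider_in : Int) (out : Int) : Prop := out = divider_from_blocks_alt blocks divider_in
instance (blocks : List (List Int)) (divider_in : Int) (out : Int) : Decidable (Spec_divider_from_blocks blocks divider_in out) := by unfold Spec_divider_from_blocks; infer_instance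

-- ===== CLAIM (what is proved, stated in full; the proofs are below) =====
def Claim_equal_divider_from_blocks : Prop := ∀ (blocks : List (List Int)) (divider_in : Int), Dom_divider_from_blocks blocks divider_in → Pre_divider_from_blocks blocks divider_in → Spec_divider_from_blocks blocks divider_in (divider_from_blocks blocks divider_in)

-- ===== LEMMAS AND PROOFS =====

-- A's merged-interval list, as one named value
def mergedOf (bs : List (List Int)) : List (Int × Int) :=
  bs.foldl aStep [(pB0 (bs.headD []), pB1 (bs.headD []))]

-- "last element satisfying P", the value a Python `for`-loop overwrite scan ends up with
def lastF {α : Type} (P : α → Prop) [DecidablePred P] (m : List α) : Option α :=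
  m.foldl (fun acc x => if P x then some x else acc) none

theorem lastF_append {α : Type} (P : α → Prop) [DecidablePred P] (xs : List α) (x : α) :
    lastF P (xs ++ [x]) = if P x then some x else lastF P xs := by
  simp [lastF, List.foldl_append]

theorem lastF_eq_none_iff {α : Type} (P : α → Prop) [DecidablePred P] (m : List α) :
    lastF P m = none ↔ ∀ x ∈ m, ¬ P x := by
  induction m using List.reverseRecOn with
  | nil => simp [lastF]
  | append_singleton xs x ih =>
    rw [lastF_append]
    split_ifs with h
    · constructor
      · intro hco; exact absurd hco (by simp)
      · intro hall; exact absurd h (hall x (by simp))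
    · rw [ih]
      constructor
      · intro hall y hy
        rcases List.mem_append.mp hy with hy | hy
        · exact hall y hy
        · simp only [List.mem_singleton] at hy
          subst hy; exact h
      · intro hall y hy
        exact hall y (List.mem_append.mpr (Or.inl hy))

theorem lastF_mem {α : Type} (P : α → Prop) [DecidablePred P] (m : List α) (y : α)
    (h : lastF P m = some y) : y ∈ m ∧ P y := by
  induction m using List.reverseRecOn with
  | nil => simp [lastF] at h
  | append_singleton xs x ih =>
    rw [lastF_append] at h
    split_ifs at h with hx
    · cases h; exact ⟨by simp, hx⟩
    · obtain ⟨h1, h2⟩ := ih h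
      exact ⟨by simp [h1], h2⟩

theorem lastF_eq_some_of {α : Type} (P : α → Prop) [DecidablePred P] (m : List α) (p : α)
    (h1 : ∀ x ∈ m, P x → x = p) (h2 : p ∈ m) (h3 : P p) : lastF P m = some p := by
  induction m using List.reverseRecOn with
  | nil => simp at h2
  | append_singleton xs x ih =>
    rw [lastF_append]
    split_ifs with hx
    · rw [h1 x (by simp) hx]
    · have hpx : p ∈ xs := by
        rcases List.mem_append.mp h2 with h | h
        · exact h
        · simp only [List.mem_singleton] at h
          subst h; exact absurd h3 hx
      exact ih (fun z hz hPz => h1 z (by simp [hz]) hPz) hpx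

-- left edge reachable from L through the merged entries (the value B's backward sweep computes)
def charT (L : Int) (m : List (Int × Int)) : Int :=
  match lastF (fun p => p.1 < L ∧ L - 1 ≤ p.2) m with
  | none => L
  | some p => p.1

theorem charT_append (L : Int) (xs : List (Int × Int)) (x : Int × Int) :
    charT L (xs ++ [x]) = if x.1 < L ∧ L - 1 ≤ x.2 then x.1 else charT L xs := by
  unfold charT
  rw [lastF_append]
  split_ifs with h <;> simp

theorem pyGetD_append_lt (m : List (Int × Int)) (x : Int × Int) (i : Int)
    (h0 : 0 ≤ i) (h1 : i < m.length) :
    PySem.List.pyGetD (m ++ [x]) i (0, 0) = PySem.List.pyGetD m i (0, 0) := by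
  simp only [PySem.List.pyGetD]
  rw [PySem.List.pyGet?_of_nonneg _ h0, PySem.List.pyGet?_of_nonneg _ h0,
    List.getElem?_append_left (by omega)]

theorem pyGetD_append_len (m : List (Int × Int)) (x : Int × Int) :
    PySem.List.pyGetD (m ++ [x]) (m.length : Int) (0, 0) = x := by
  simp only [PySem.List.pyGetD]
  rw [PySem.List.pyGet?_append_length]
  rfl

-- A's index scan over merged selects exactly the LAST containing entry (as lastF)
theorem scan_spec (d : Int) (m : List (Int × Int)) :
    (((PySem.List.pyRange 0 m.length).foldl
        (fun acc i =>
          let mb := PySem.List.pyGetD m i (0, 0)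
          if mb.1 ≤ d ∧ d ≤ mb.2 then i else acc) (-1)) = -1 ∧
      lastF (fun p : Int × Int => p.1 ≤ d ∧ d ≤ p.2) m = none) ∨
    (∃ ob : Int, ((PySem.List.pyRange 0 m.length).foldl
        (fun acc i =>
          let mb := PySem.List.pyGetD m i (0, 0)
          if mb.1 ≤ d ∧ d ≤ mb.2 then i else acc) (-1)) = ob ∧
      0 ≤ ob ∧ ob < m.length ∧
      ∃ p, lastF (fun p : Int × Int => p.1 ≤ d ∧ d ≤ p.2) m = some p ∧
        PySem.List.pyGetD m ob (0, 0) = p) := by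
  induction m using List.reverseRecOn with
  | nil => left; constructor <;> simp [PySem.List.pyRange, lastF]
  | append_singleton m x ih =>
    have hlen : ((m ++ [x]).length : Int) = (m.length : Int) + 1 := by simp
    have hsplit : PySem.List.pyRange 0 ((m ++ [x]).length : Int)
        = PySem.List.pyRange 0 (m.length : Int) ++ [(m.length : Int)] := by
      rw [hlen]
      rw [PySem.List.pyRange_one_append 0 ((m.length : Int)) ((m.length : Int) + 1)
        (Int.natCast_nonneg _) (le_of_lt (lt_add_one _))]
      rw [@PySem.List.pyRange_one_cons ((m.length : Int)) ((m.length : Int) + 1) (lt_add_one _)]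
      simp [PySem.List.pyRange]
    have hcongr : (PySem.List.pyRange 0 (m.length : Int)).foldl
        (fun acc i =>
          let mb := PySem.List.pyGetD (m ++ [x]) i (0, 0)
          if mb.1 ≤ d ∧ d ≤ mb.2 then i else acc) (-1)
        = (PySem.List.pyRange 0 (m.length : Int)).foldl
        (fun acc i =>
          let mb := PySem.List.pyGetD m i (0, 0)
          if mb.1 ≤ d ∧ d ≤ mb.2 then i else acc) (-1) := by
      apply PySem.List.foldl_congr_mem
      intro acc i hi
      rw [PySem.List.mem_pyRange_one] at hi
      simp only [pyGetD_append_lt m x i hi.1 hi.2]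
    have hstep : lastF (fun p : Int × Int => p.1 ≤ d ∧ d ≤ p.2) (m ++ [x])
        = if x.1 ≤ d ∧ d ≤ x.2 then some x
          else lastF (fun p : Int × Int => p.1 ≤ d ∧ d ≤ p.2) m :=
      lastF_append _ m x
    rw [hsplit, List.foldl_append, hcongr]
    simp only [List.foldl_cons, List.foldl_nil]
    rw [pyGetD_append_len]
    by_cases hx : x.1 ≤ d ∧ d ≤ x.2
    · right
      refine ⟨(m.length : Int), by simp [hx], Int.natCast_nonneg _, by rw [hlen]; omega, x,
        by rw [hstep, if_pos hx], pyGetD_append_len m x⟩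
    · rw [hstep, if_neg hx]
      simp only [if_neg hx]
      rcases ih with ⟨h1, h2⟩ | ⟨ob, h1, h2, h3, p, h4, h5⟩
      · left; exact ⟨h1, h2⟩
      · right
        exact ⟨ob, h1, h2, by rw [hlen]; omega, p, h4,
          by rw [pyGetD_append_lt m x ob h2 h3]; exact h5⟩

-- under the gap invariant, the backward sweep value at the divider is the containing entry's left edge
theorem bwd_val (d : Int) (m : List (Int × Int)) (p : Int × Int)
    (hpw : List.Pairwise (fun p q : Int × Int => p.2 + 1 < q.1 ∧ p.1 ≤ q.1) m)
    (h : lastF (fun p : Int × Int => p.1 ≤ d ∧ d ≤ p.2) m = some p) :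
    charT d m = p.1 := by
  have hmemP := lastF_mem _ m p h
  have hpm : p ∈ m := hmemP.1
  obtain ⟨hp1, hp2⟩ := hmemP.2
  have hS : List.Pairwise
      (fun x y : Int × Int => (x.2 + 1 < y.1 ∧ x.1 ≤ y.1) ∨ (y.2 + 1 < x.1 ∧ y.1 ≤ x.1)) m :=
    hpw.imp fun h => Or.inl h
  have hforall := hS.forall (by intro a b h; tauto)
  have huniq : ∀ x ∈ m, (x.1 < d ∧ d - 1 ≤ x.2) → x = p := by
    intro x hx htx
    by_contra hne
    rcases hforall hx hpm hne with h' | h' <;> omega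
  by_cases hpd : p.1 < d
  · have := lastF_eq_some_of _ m p huniq hpm ⟨hpd, by omega⟩
    unfold charT
    rw [this]
  · have hnone : lastF (fun x : Int × Int => x.1 < d ∧ d - 1 ≤ x.2) m = none := by
      rw [lastF_eq_none_iff]
      intro x hx ht
      have := huniq x hx ht
      subst this
      omega
    simp only [charT, hnone]
    omega

-- the fused invariant: A's merged list has the gap/order/coverage structure, its last containing
-- entry's edges are exactly what B's two sweeps compute, starting from the divider
theorem mainInv (d : Int) : ∀ (bs : List (List Int)), bs ≠ [] →
    List.Pairwise (fun c b => pB0 c ≤ pB0 b) bs →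
    mergedOf bs ≠ [] ∧
    List.Pairwise (fun p q : Int × Int => p.2 + 1 < q.1 ∧ p.1 ≤ q.1) (mergedOf bs) ∧
    (∀ p ∈ mergedOf bs, ∃ c ∈ bs, p.1 = pB0 c) ∧
    (∀ x : Int, (∃ p ∈ mergedOf bs, p.1 ≤ x ∧ x ≤ p.2) ↔ ∃ c ∈ bs, pB0 c ≤ x ∧ x ≤ pB1 c) ∧
    (∀ p, lastF (fun p : Int × Int => p.1 ≤ d ∧ d ≤ p.2) (mergedOf bs) = some p →
      bs.foldl fwdStep d = p.2) ∧
    (lastF (fun p : Int × Int => p.1 ≤ d ∧ d ≤ p.2) (mergedOf bs) = none →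
      bs.foldl fwdStep d = d ∨ ∃ c ∈ bs, d + 1 ≤ pB0 c) ∧
    (∀ L : Int, bs.reverse.foldl bwdStep L = charT L (mergedOf bs)) := by
  intro bs
  induction bs using List.reverseRecOn with
  | nil => intro h; exact absurd rfl h
  | append_singleton ys b ih =>
    intro _ hsort
    rcases eq_or_ne ys [] with rfl | hys
    · -- base: a single block
      clear ih
      by_cases hb : pB0 b > pB1 b + 1
      · have h0 : mergedOf ([] ++ [b]) = [(pB0 b, pB1 b), (pB0 b, pB1 b)] := by
          simp [mergedOf, aStep, hb]
        rw [h0]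
        refine ⟨by simp, ?_, ?_, ?_, ?_, ?_, ?_⟩
        · refine List.pairwise_cons.mpr ⟨?_, by simp⟩
          intro q hq
          simp only [List.mem_singleton] at hq
          subst hq
          exact ⟨by omega, le_refl _⟩
        · intro p hp
          simp only [List.mem_cons] at hp
          rcases hp with rfl | hp
          · exact ⟨b, by simp, rfl⟩
          · rcases hp with rfl | hp
            · exact ⟨b, by simp, rfl⟩
            · simp at hp
        · intro x
          constructor
          · rintro ⟨p, hp, h1, h2⟩
            simp only [List.mem_cons] at hp
            rcases hp with rfl | rfl | hp
            · exact ⟨b, by simp, h1, h2⟩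
            · exact ⟨b, by simp, h1, h2⟩
            · simp at hp
          · rintro ⟨c, hc, h1, h2⟩
            simp only [List.nil_append, List.mem_singleton] at hc
            rw [hc] at h1 h2
            exact ⟨(pB0 b, pB1 b), by simp, h1, h2⟩
        · intro p hp
          have : lastF (fun p : Int × Int => p.1 ≤ d ∧ d ≤ p.2)
              [(pB0 b, pB1 b), (pB0 b, pB1 b)] = none := by
            rw [lastF_eq_none_iff]
            intro x hx
            simp only [List.mem_cons] at hx
            rcases hx with rfl | rfl | hx
            · simp; omega
            · simp; omega
            · simp at hx
          rw [this] at hp; simp at hp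
        · intro _
          show [b].foldl fwdStep d = d ∨ _
          simp only [List.foldl_cons, List.foldl_nil]
          unfold fwdStep
          split_ifs with h
          · right; exact ⟨b, by simp, by omega⟩
          · left; rfl
        · intro L
          show [b].foldl bwdStep L = _
          simp only [List.foldl_cons, List.foldl_nil]
          have hlf : lastF (fun p : Int × Int => p.1 < L ∧ L - 1 ≤ p.2)
              [(pB0 b, pB1 b), (pB0 b, pB1 b)]
              = if pB0 b < L ∧ L - 1 ≤ pB1 b then some (pB0 b, pB1 b) else none := by
            simp [lastF]
          have hch : charT L [(pB0 b, pB1 b), (pB0 b, pB1 b)]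
              = if pB0 b < L ∧ L - 1 ≤ pB1 b then pB0 b else L := by
            unfold charT
            rw [hlf]
            split_ifs <;> rfl
          rw [hch]
          unfold bwdStep
          split_ifs <;> omega
      · have h0 : mergedOf ([] ++ [b]) = [(pB0 b, pB1 b)] := by
          simp [mergedOf, aStep, hb]
        rw [h0]
        refine ⟨by simp, by simp, ?_, ?_, ?_, ?_, ?_⟩
        · intro p hp
          simp only [List.mem_singleton] at hp
          subst hp
          exact ⟨b, by simp, rfl⟩
        · intro x
          constructor
          · rintro ⟨p, hp, h1, h2⟩
            simp only [List.mem_singleton] at hp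
            subst hp
            exact ⟨b, by simp, h1, h2⟩
          · rintro ⟨c, hc, h1, h2⟩
            simp only [List.nil_append, List.mem_singleton] at hc
            rw [hc] at h1 h2
            exact ⟨(pB0 b, pB1 b), by simp, h1, h2⟩
        · intro p hp
          have hstep : lastF (fun p : Int × Int => p.1 ≤ d ∧ d ≤ p.2) [(pB0 b, pB1 b)]
              = if pB0 b ≤ d ∧ d ≤ pB1 b then some (pB0 b, pB1 b) else none := by
            simp [lastF]
          rw [hstep] at hp
          by_cases hc : pB0 b ≤ d ∧ d ≤ pB1 b
          · rw [if_pos hc] at hp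
            injection hp with hp
            subst hp
            show [b].foldl fwdStep d = pB1 b
            simp only [List.foldl_cons, List.foldl_nil]
            unfold fwdStep
            split_ifs with h <;> omega
          · rw [if_neg hc] at hp
            simp at hp
        · intro hp
          show [b].foldl fwdStep d = d ∨ _
          simp only [List.foldl_cons, List.foldl_nil]
          have hstep : lastF (fun p : Int × Int => p.1 ≤ d ∧ d ≤ p.2) [(pB0 b, pB1 b)]
              = if pB0 b ≤ d ∧ d ≤ pB1 b then some (pB0 b, pB1 b) else none := by
            simp [lastF]
          rw [hstep] at hp
          by_cases hc : pB0 b ≤ d ∧ d ≤ pB1 b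
          · rw [if_pos hc] at hp
            simp at hp
          · unfold fwdStep
            split_ifs with h
            · right; exact ⟨b, by simp, by omega⟩
            · left; rfl
        · intro L
          show [b].foldl bwdStep L = _
          simp only [List.foldl_cons, List.foldl_nil]
          have hlf : lastF (fun p : Int × Int => p.1 < L ∧ L - 1 ≤ p.2) [(pB0 b, pB1 b)]
              = if pB0 b < L ∧ L - 1 ≤ pB1 b then some (pB0 b, pB1 b) else none := by
            simp [lastF]
          have hch : charT L [(pB0 b, pB1 b)]
              = if pB0 b < L ∧ L - 1 ≤ pB1 b then pB0 b else L := by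
            unfold charT
            rw [hlf]
            split_ifs <;> rfl
          rw [hch]
          unfold bwdStep
          split_ifs <;> omega
    · -- step: append one more (sorted-last) block b
      obtain ⟨hs1, -, hcb⟩ := List.pairwise_append.mp hsort
      have hble : ∀ c ∈ ys, pB0 c ≤ pB0 b := fun c hc => hcb c hc b (by simp)
      obtain ⟨hm, hpw, hst, hcov, hfwdS, hfwdN, hbwd⟩ := ih hys hs1
      have hhead : (ys ++ [b]).headD [] = ys.headD [] := by
        cases ys with
        | nil => exact absurd rfl hys
        | cons y t => rfl
      have hfold : mergedOf (ys ++ [b]) = aStep (mergedOf ys) b := by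
        unfold mergedOf
        rw [hhead, List.foldl_append]
        rfl
      set mo := mergedOf ys with hmo
      set q := mo.getLast hm with hq
      have hqlast : mo.getLastD (0, 0) = q := by
        rw [List.getLastD_eq_getLast?, List.getLast?_eq_some_getLast hm]
        rfl
      have hsplit : mo.dropLast ++ [q] = mo := List.dropLast_concat_getLast hm
      have hqmem : q ∈ mo := List.getLast_mem hm
      have hq1b : q.1 ≤ pB0 b := by
        obtain ⟨c, hc, hqc⟩ := hst q hqmem
        rw [hqc]; exact hble c hc
      have hstb : ∀ p ∈ mo, p.1 ≤ pB0 b := by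
        intro p hp
        obtain ⟨c, hc, e⟩ := hst p hp
        rw [e]; exact hble c hc
      have hpair' := hsplit ▸ hpw
      obtain ⟨hpwd, -, hpd'⟩ := List.pairwise_append.mp hpair'
      have hpd : ∀ p ∈ mo.dropLast, p.2 + 1 < q.1 ∧ p.1 ≤ q.1 := by
        intro p hp; exact hpd' p hp q (by simp)
      have hmemo : ∀ p ∈ mo, p ∈ mo.dropLast ∨ p = q := by
        intro p hp
        rw [← hsplit] at hp
        rcases List.mem_append.mp hp with h | h
        · exact Or.inl h
        · simp only [List.mem_singleton] at h; exact Or.inr h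
      have hqdl : lastF (fun p : Int × Int => p.1 ≤ d ∧ d ≤ p.2) mo
          = if q.1 ≤ d ∧ d ≤ q.2 then some q
            else lastF (fun p : Int × Int => p.1 ≤ d ∧ d ≤ p.2) mo.dropLast := by
        have := lastF_append (fun p : Int × Int => p.1 ≤ d ∧ d ≤ p.2) mo.dropLast q
        rw [hsplit] at this
        exact this
      have hcharmo : ∀ L : Int, charT L mo
          = if q.1 < L ∧ L - 1 ≤ q.2 then q.1 else charT L mo.dropLast := by
        intro L
        have := charT_append L mo.dropLast q
        rw [hsplit] at this
        exact this
      have hf : (ys ++ [b]).foldl fwdStep d = fwdStep (ys.foldl fwdStep d) b := by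
        rw [List.foldl_append]; rfl
      have hrev : ∀ L : Int, (ys ++ [b]).reverse.foldl bwdStep L
          = ys.reverse.foldl bwdStep (bwdStep L b) := by
        intro L
        rw [List.reverse_append]
        simp only [List.reverse_cons, List.reverse_nil, List.nil_append, List.singleton_append,
          List.foldl_cons]
      unfold aStep at hfold
      rw [hqlast] at hfold
      by_cases hO : pB0 b > q.2 + 1
      · -- a new merged entry opens
        rw [if_pos hO] at hfold
        rw [hfold]
        refine ⟨by simp [hm], ?_, ?_, ?_, ?_, ?_, ?_⟩
        · refine List.pairwise_append.mpr ⟨hpw, by simp, ?_⟩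
          intro p hp x hx
          simp only [List.mem_singleton] at hx
          subst hx
          rcases hmemo p hp with h | rfl
          · have h1 := hpd p h
            exact ⟨by omega, by omega⟩
          · exact ⟨by omega, hq1b⟩
        · intro p hp
          rcases List.mem_append.mp hp with h | h
          · obtain ⟨c, hc, e⟩ := hst p h
            exact ⟨c, by simp [hc], e⟩
          · simp only [List.mem_singleton] at h
            subst h
            exact ⟨b, by simp, rfl⟩
        · intro x
          constructor
          · rintro ⟨p, hp, h1, h2⟩
            rcases List.mem_append.mp hp with h | h
            · obtain ⟨c, hc, hc1, hc2⟩ := (hcov x).mp ⟨p, h, h1, h2⟩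
              exact ⟨c, by simp [hc], hc1, hc2⟩
            · simp only [List.mem_singleton] at h
              subst h
              exact ⟨b, by simp, h1, h2⟩
          · rintro ⟨c, hc, h1, h2⟩
            rcases List.mem_append.mp hc with h | h
            · obtain ⟨p, hp, hp1, hp2⟩ := (hcov x).mpr ⟨c, h, h1, h2⟩
              exact ⟨p, by simp [hp], hp1, hp2⟩
            · simp only [List.mem_singleton] at h
              subst h
              exact ⟨(pB0 c, pB1 c), by simp, h1, h2⟩
        · intro p hp
          rw [lastF_append] at hp
          dsimp only at hp
          by_cases hcd : pB0 b ≤ d ∧ d ≤ pB1 b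
          · rw [if_pos hcd] at hp
            injection hp with hp
            subst hp
            have hnone : lastF (fun p : Int × Int => p.1 ≤ d ∧ d ≤ p.2) mo = none := by
              rw [lastF_eq_none_iff]
              rintro x hx ⟨h1, h2⟩
              rcases hmemo x hx with h | rfl
              · have := hpd x h
                omega
              · omega
            rcases hfwdN hnone with he | ⟨c, hc, hdc⟩
            · rw [hf, he]
              show fwdStep d b = pB1 b
              unfold fwdStep
              split_ifs with h <;> omega
            · exact absurd (hble c hc) (by omega)
          · rw [if_neg hcd] at hp
            rw [hf, hfwdS p hp]
            have hnof : ¬ (pB0 b ≤ p.2 + 1 ∧ pB1 b > p.2) := by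
              obtain ⟨hpm', -⟩ := lastF_mem _ mo p hp
              rcases hmemo p hpm' with h | rfl
              · have := hpd p h
                omega
              · omega
            unfold fwdStep
            rw [if_neg hnof]
        · intro hp
          rw [lastF_append] at hp
          dsimp only at hp
          by_cases hcd : pB0 b ≤ d ∧ d ≤ pB1 b
          · rw [if_pos hcd] at hp
            simp at hp
          · rw [if_neg hcd] at hp
            rcases hfwdN hp with he | ⟨c, hc, hdc⟩
            · rw [hf, he]
              unfold fwdStep
              split_ifs with h
              · right; exact ⟨b, by simp, by omega⟩
              · left; rfl
            · right; exact ⟨c, by simp [hc], hdc⟩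
        · intro L
          rw [hrev L, hbwd (bwdStep L b), charT_append]
          dsimp only
          unfold bwdStep
          by_cases hfire : pB1 b ≥ L - 1 ∧ pB0 b < L
          · rw [if_pos hfire, if_pos (by exact ⟨hfire.2, hfire.1⟩)]
            have hnone : lastF (fun p : Int × Int => p.1 < pB0 b ∧ pB0 b - 1 ≤ p.2) mo
                = none := by
              rw [lastF_eq_none_iff]
              rintro x hx ⟨h1, h2⟩
              rcases hmemo x hx with h | rfl
              · have := hpd x h
                omega
              · omega
            unfold charT
            rw [hnone]
          · rw [if_neg hfire, if_neg (by omega)]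
      · rw [if_neg hO] at hfold
        by_cases hE : pB1 b > q.2
        · -- the open entry extends to b's end
          rw [if_pos hE] at hfold
          rw [hfold]
          refine ⟨by simp, ?_, ?_, ?_, ?_, ?_, ?_⟩
          · refine List.pairwise_append.mpr ⟨hpwd, by simp, ?_⟩
            intro p hp x hx
            simp only [List.mem_singleton] at hx
            subst hx
            exact hpd p hp
          · intro p hp
            rcases List.mem_append.mp hp with h | h
            · obtain ⟨c, hc, e⟩ := hst p (List.dropLast_subset _ h)
              exact ⟨c, by simp [hc], e⟩
            · simp only [List.mem_singleton] at h
              subst h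
              obtain ⟨c, hc, e⟩ := hst q hqmem
              exact ⟨c, by simp [hc], e⟩
          · intro x
            constructor
            · rintro ⟨p, hp, h1, h2⟩
              rcases List.mem_append.mp hp with h | h
              · obtain ⟨c, hc, hc1, hc2⟩ :=
                  (hcov x).mp ⟨p, List.dropLast_subset _ h, h1, h2⟩
                exact ⟨c, by simp [hc], hc1, hc2⟩
              · simp only [List.mem_singleton] at h
                subst h
                by_cases hxq : x ≤ q.2
                · obtain ⟨c, hc, hc1, hc2⟩ := (hcov x).mp ⟨q, hqmem, h1, hxq⟩
                  exact ⟨c, by simp [hc], hc1, hc2⟩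
                · exact ⟨b, by simp, by omega, h2⟩
            · rintro ⟨c, hc, h1, h2⟩
              rcases List.mem_append.mp hc with h | h
              · obtain ⟨p, hp, hp1, hp2⟩ := (hcov x).mpr ⟨c, h, h1, h2⟩
                rcases hmemo p hp with h' | rfl
                · exact ⟨p, by simp [h'], hp1, hp2⟩
                · exact ⟨(q.1, pB1 b), by simp, hp1, by omega⟩
              · simp only [List.mem_singleton] at h
                rw [h] at h1 h2
                exact ⟨(q.1, pB1 b), by simp, by omega, h2⟩
          · intro p hp
            rw [lastF_append] at hp
            dsimp only at hp
            by_cases hc2 : q.1 ≤ d ∧ d ≤ pB1 b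
            · rw [if_pos hc2] at hp
              injection hp with hp
              subst hp
              by_cases hdq : d ≤ q.2
              · have hlq : lastF (fun p : Int × Int => p.1 ≤ d ∧ d ≤ p.2) mo = some q := by
                  rw [hqdl, if_pos ⟨hc2.1, hdq⟩]
                rw [hf, hfwdS q hlq]
                show fwdStep q.2 b = pB1 b
                unfold fwdStep
                rw [if_pos ⟨by omega, hE⟩]
              · have hnd : lastF (fun p : Int × Int => p.1 ≤ d ∧ d ≤ p.2) mo = none := by
                  rw [hqdl, if_neg (by omega), lastF_eq_none_iff]
                  rintro x hx ⟨h1, h2⟩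
                  have := hpd x hx
                  omega
                rcases hfwdN hnd with he | ⟨c, hc, hdc⟩
                · rw [hf, he]
                  show fwdStep d b = pB1 b
                  unfold fwdStep
                  split_ifs with h <;> omega
                · exact absurd (hble c hc) (by omega)
            · rw [if_neg hc2] at hp
              have hnq : ¬ (q.1 ≤ d ∧ d ≤ q.2) := by omega
              rw [hf, hfwdS p (by rw [hqdl, if_neg hnq]; exact hp)]
              have hnof : ¬ (pB0 b ≤ p.2 + 1 ∧ pB1 b > p.2) := by
                obtain ⟨hpm', -⟩ := lastF_mem _ mo.dropLast p hp
                have := hpd p hpm'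
                omega
              unfold fwdStep
              rw [if_neg hnof]
          · intro hp
            rw [lastF_append] at hp
            dsimp only at hp
            by_cases hc2 : q.1 ≤ d ∧ d ≤ pB1 b
            · rw [if_pos hc2] at hp
              simp at hp
            · rw [if_neg hc2] at hp
              have hnq : ¬ (q.1 ≤ d ∧ d ≤ q.2) := by omega
              have hnd : lastF (fun p : Int × Int => p.1 ≤ d ∧ d ≤ p.2) mo = none := by
                rw [hqdl, if_neg hnq]; exact hp
              rcases hfwdN hnd with he | ⟨c, hc, hdc⟩
              · rw [hf, he]
                unfold fwdStep
                split_ifs with h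
                · right; exact ⟨b, by simp, by omega⟩
                · left; rfl
              · right; exact ⟨c, by simp [hc], hdc⟩
          · intro L
            rw [hrev L, hbwd (bwdStep L b), charT_append]
            dsimp only
            unfold bwdStep
            by_cases hfire : pB1 b ≥ L - 1 ∧ pB0 b < L
            · rw [if_pos hfire, if_pos (by constructor <;> omega)]
              rw [hcharmo (pB0 b)]
              by_cases hq1 : q.1 < pB0 b
              · rw [if_pos ⟨hq1, by omega⟩]
              · rw [if_neg (by omega)]
                have hnone : lastF (fun p : Int × Int => p.1 < pB0 b ∧ pB0 b - 1 ≤ p.2)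
                    mo.dropLast = none := by
                  rw [lastF_eq_none_iff]
                  rintro x hx ⟨h1, h2⟩
                  have := hpd x hx
                  omega
                unfold charT
                rw [hnone]
                show pB0 b = q.1
                omega
            · rw [if_neg hfire]
              by_cases htn : q.1 < L ∧ L - 1 ≤ pB1 b
              · rw [if_pos htn, hcharmo L, if_pos ⟨htn.1, by omega⟩]
              · rw [if_neg htn, hcharmo L, if_neg (by omega)]
        · -- b is swallowed by the open entry
          rw [if_neg hE] at hfold
          rw [hfold]
          refine ⟨hm, hpw, ?_, ?_, ?_, ?_, ?_⟩
          · intro p hp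
            obtain ⟨c, hc, e⟩ := hst p hp
            exact ⟨c, by simp [hc], e⟩
          · intro x
            constructor
            · rintro ⟨p, hp, h1, h2⟩
              obtain ⟨c, hc, hc1, hc2⟩ := (hcov x).mp ⟨p, hp, h1, h2⟩
              exact ⟨c, by simp [hc], hc1, hc2⟩
            · rintro ⟨c, hc, h1, h2⟩
              rcases List.mem_append.mp hc with h | h
              · exact (hcov x).mpr ⟨c, h, h1, h2⟩
              · simp only [List.mem_singleton] at h
                rw [h] at h1 h2
                exact ⟨q, hqmem, by omega, by omega⟩
          · intro p hp
            rw [hf, hfwdS p hp]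
            have hnof : ¬ (pB0 b ≤ p.2 + 1 ∧ pB1 b > p.2) := by
              obtain ⟨hpm', -⟩ := lastF_mem _ mo p hp
              rcases hmemo p hpm' with h | rfl
              · have := hpd p h
                omega
              · omega
            unfold fwdStep
            rw [if_neg hnof]
          · intro hp
            rcases hfwdN hp with he | ⟨c, hc, hdc⟩
            · rw [hf, he]
              unfold fwdStep
              split_ifs with h
              · by_cases hb0 : pB0 b ≤ d
                · exfalso
                  exact (lastF_eq_none_iff _ mo).mp hp q hqmem ⟨by omega, by omega⟩
                · right; exact ⟨b, by simp, by omega⟩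
              · left; rfl
            · right; exact ⟨c, by simp [hc], hdc⟩
          · intro L
            rw [hrev L, hbwd (bwdStep L b)]
            unfold bwdStep
            by_cases hfire : pB1 b ≥ L - 1 ∧ pB0 b < L
            · rw [if_pos hfire]
              have hL : charT L mo = q.1 := by
                rw [hcharmo L, if_pos ⟨by omega, by omega⟩]
              rw [hL, hcharmo (pB0 b)]
              by_cases hq1 : q.1 < pB0 b
              · rw [if_pos ⟨hq1, by omega⟩]
              · rw [if_neg (by omega)]
                have hnone : lastF (fun p : Int × Int => p.1 < pB0 b ∧ pB0 b - 1 ≤ p.2)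
                    mo.dropLast = none := by
                  rw [lastF_eq_none_iff]
                  rintro x hx ⟨h1, h2⟩
                  have := hpd x hx
                  omega
                unfold charT
                rw [hnone]
                show pB0 b = q.1
                omega
            · rw [if_neg hfire]

-- lexicographic ≤ on nonempty int lists bounds the heads
theorem pB0_cons (x : Int) (xs : List Int) : pB0 (x :: xs) = x := by
  simp [pB0, PySem.List.pyGetD, PySem.List.pyGet?, PySem.List.pyIdx?]

theorem lexHead (a b : List Int) (ha : a ≠ []) (hb : b ≠ []) (h : a ≤ b) : pB0 a ≤ pB0 b := by
  rcases le_iff_lt_or_eq.mp h with hlt | rfl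
  · obtain ⟨x, xs, rfl⟩ := List.exists_cons_of_ne_nil ha
    obtain ⟨y, ys, rfl⟩ := List.exists_cons_of_ne_nil hb
    have hlt' : List.Lex (· < ·) (x :: xs) (y :: ys) := hlt
    rw [pB0_cons, pB0_cons]
    cases hlt' with
    | rel h' => exact le_of_lt h'
    | cons h' => exact le_refl _
  · exact le_refl _

-- the two function bodies agree for any sorted nonempty bs
theorem core_eq (d : Int) (bs : List (List Int)) (hne : bs ≠ [])
    (hsort : List.Pairwise (fun c b => pB0 c ≤ pB0 b) bs) :
    (let merged := bs.foldl aStep [(pB0 (bs.headD []), pB1 (bs.headD []))]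
     let ob := (PySem.List.pyRange 0 merged.length).foldl
        (fun acc i =>
          let mb := PySem.List.pyGetD merged i (0, 0)
          if mb.1 ≤ d ∧ d ≤ mb.2 then i else acc) (-1)
     if 0 ≤ ob then
       let mb := PySem.List.pyGetD merged ob (0, 0)
       if d - mb.1 < mb.2 - d then mb.1 - 1 else mb.2 + 1
     else d)
    = (if ¬ ((bs.any fun b => decide (pB0 b ≤ d ∧ d ≤ pB1 b)) = true) then d
       else
         let hi := bs.foldl fwdStep d
         let lo := bs.reverse.foldl bwdStep d
         if d - lo < hi - d then lo - 1 else hi + 1) := by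
  obtain ⟨hm, hpw, hst, hcov, hfwdS, hfwdN, hbwd⟩ := mainInv d bs hne hsort
  show (let merged := mergedOf bs
     let ob := (PySem.List.pyRange 0 merged.length).foldl
        (fun acc i =>
          let mb := PySem.List.pyGetD merged i (0, 0)
          if mb.1 ≤ d ∧ d ≤ mb.2 then i else acc) (-1)
     if 0 ≤ ob then
       let mb := PySem.List.pyGetD merged ob (0, 0)
       if d - mb.1 < mb.2 - d then mb.1 - 1 else mb.2 + 1
     else d) = _
  rcases hLC : lastF (fun p : Int × Int => p.1 ≤ d ∧ d ≤ p.2) (mergedOf bs) with _ | p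
  · -- no merged entry contains the divider: both sides return d
    rcases scan_spec d (mergedOf bs) with ⟨h1, _⟩ | ⟨ob, h1, h2, h3, p, h4, h5⟩
    · have hany : (bs.any fun b => decide (pB0 b ≤ d ∧ d ≤ pB1 b)) = false := by
        rw [List.any_eq_false]
        intro b hb
        simp only [decide_eq_true_eq]
        intro hc
        obtain ⟨p, hp, hp1, hp2⟩ := (hcov d).mpr ⟨b, hb, hc⟩
        exact (lastF_eq_none_iff _ _).mp hLC p hp ⟨hp1, hp2⟩
      simp only [h1, hany]
      norm_num
    · rw [hLC] at h4; cases h4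
  · -- one entry contains it: A reads its edges from the list, B from the two sweeps
    have hmemP := lastF_mem _ (mergedOf bs) p hLC
    have hpm : p ∈ mergedOf bs := hmemP.1
    obtain ⟨hp1, hp2⟩ := hmemP.2
    rcases scan_spec d (mergedOf bs) with ⟨_, h2⟩ | ⟨ob, h1, h2, h3, p', h4, h5⟩
    · rw [hLC] at h2; cases h2
    · rw [hLC] at h4
      injection h4 with h4
      subst h4
      have hany : (bs.any fun b => decide (pB0 b ≤ d ∧ d ≤ pB1 b)) = true := by
        rw [List.any_eq_true]
        obtain ⟨c, hc, hc1, hc2⟩ := (hcov d).mp ⟨p, hpm, hp1, hp2⟩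
        exact ⟨c, hc, by simp [hc1, hc2]⟩
      have hhi : bs.foldl fwdStep d = p.2 := hfwdS p hLC
      have hlo : bs.reverse.foldl bwdStep d = p.1 := by
        rw [hbwd d]
        exact bwd_val d (mergedOf bs) p hpw hLC
      simp only [h1, hany, if_pos h2, h5, hhi, hlo]
      norm_num
-- ===== VERDICT (by name: the statement is the Claim_ definition above) =====
theorem divider_from_blocks_spec : Claim_equal_divider_from_blocks := by
  intro blocks d _ hpre
  unfold Spec_divider_from_blocks divider_from_blocks divider_from_blocks_alt
  have hbsne : PySem.List.sorted blocks (fun x => x) false ≠ [] := by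
    rw [Ne, PySem.List.sorted_eq_nil_iff]
    exact hpre.1
  have hmem : ∀ c ∈ PySem.List.sorted blocks (fun x => x) false, c ≠ [] := by
    intro c hc
    rw [PySem.List.mem_sorted] at hc
    have := hpre.2 c hc
    intro h
    subst h
    simp at this
  have hpairLE : List.Pairwise (fun a b : List Int => a ≤ b)
      (PySem.List.sorted blocks (fun x => x) false) := by
    have h0 := PySem.List.sorted_pairwise (xs := blocks) (key := fun x : List Int => x)
    have e : @PySem.List.sorted (List Int) (List Int) List.instLinearOrder.toLT
        LinearOrder.toDecidableLT blocks (fun x => x) false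
        = PySem.List.sorted blocks (fun x => x) false := by
      congr 1
    rw [e] at h0
    exact h0
  have hsortHead : List.Pairwise (fun c b => pB0 c ≤ pB0 b)
      (PySem.List.sorted blocks (fun x => x) false) := by
    refine List.Pairwise.imp_of_mem ?_ hpairLE
    intro a b ha hb hab
    exact lexHead a b (hmem a ha) (hmem b hb) hab
  exact core_eq d (PySem.List.sorted blocks (fun x => x) false) hbsne hsortHead
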